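-- pv_equiv track=rewrite | github.com/yasufumi-nakata/Pytra | tools/check_transpiler_version_gate.py | _is_semver_text
-- ===== SOURCE A (Python) =====
-- from typing import Any
--
-- def _is_semver_text(raw: Any) -> bool:
--     if not isinstance(raw, str):
--         return False
--     parts = raw.split(".")
--     if len(parts) != 3:
--         return False
--     for p in parts:
--         if p == "" or not p.isdigit():
--             return False
--     return True
-- ===== SOURCE B (Python) =====
-- from typing import Any
--
-- def _is_semver_text(raw: Any) -> bool:
--     # One pass over the characters: count dots, track current segment length.
--     if not isinstance(raw, str):
--         return False
--     dots = 0
--     seg = 0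
--     for ch in raw:
--         if ch == '.':
--             if seg == 0 or dots == 2:
--                 return False
--             dots += 1
--             seg = 0
--         elif ch.isdigit():
--             seg += 1
--         else:
--             return False
--     return dots == 2 and seg > 0
-- ===== Notes on version B (the rewrite author's own statement) =====
-- stated objective: alternative
-- what changed: Replaces the split-on-dot plus per-part emptiness/isdigit loop with a single character scan maintaining a dot counter and current-segment length, bailing early on a bad character, empty segment or a third dot.
import Mathlib
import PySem

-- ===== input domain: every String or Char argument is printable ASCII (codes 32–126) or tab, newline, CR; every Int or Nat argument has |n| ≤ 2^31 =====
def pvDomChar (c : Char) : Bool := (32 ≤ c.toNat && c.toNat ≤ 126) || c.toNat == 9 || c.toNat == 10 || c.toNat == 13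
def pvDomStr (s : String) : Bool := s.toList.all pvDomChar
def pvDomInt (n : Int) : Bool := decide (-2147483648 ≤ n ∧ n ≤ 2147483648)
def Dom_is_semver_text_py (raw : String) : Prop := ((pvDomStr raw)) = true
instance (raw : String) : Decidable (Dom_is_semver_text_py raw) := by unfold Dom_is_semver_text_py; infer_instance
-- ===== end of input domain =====

-- B replaces the split-on-dot + per-part loop by a single character scan with a dot
-- counter and current-segment length (alternative decomposition, same cost).

-- ===== PORT A =====
-- the 'for p in parts' loop of A
def pvCheckParts : List String → Bool
  | [] => true
  | p :: rest =>
      if p = "" ∨ ¬ PySem.Str.strIsdigit p then false else pvCheckParts rest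

def is_semver_text_py (raw : String) : Bool :=
  -- raw is a String here, so the isinstance(raw, str) guard is always True
  match PySem.Str.split? raw "." with
  | none => false      -- unreachable: the separator "." is nonempty
  | some parts => if parts.length ≠ 3 then false else pvCheckParts parts

-- ===== PORT B =====
-- the 'for ch in raw' loop of B, carrying (dots, seg)
def pvAltLoop : List Char → Nat → Nat → Bool
  | [], dots, seg => dots == 2 && seg != 0
  | c :: rest, dots, seg =>
      if c = '.' then
        if seg = 0 ∨ dots = 2 then false else pvAltLoop rest (dots + 1) 0
      else if PySem.Chars.isdigit c then pvAltLoop rest dots (seg + 1)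
      else false

def is_semver_text_py_alt (raw : String) : Bool := pvAltLoop raw.toList 0 0

-- ===== PRECONDITION & SPEC =====
def Spec_is_semver_text_py (raw : String) (out : Bool) : Prop := out = is_semver_text_py_alt raw
instance (raw : String) (out : Bool) : Decidable (Spec_is_semver_text_py raw out) := by unfold Spec_is_semver_text_py; infer_instance

-- ===== CLAIM (what is proved, stated in full; the proofs are below) =====
def Claim_equal_is_semver_text_py : Prop := ∀ (raw : String), Dom_is_semver_text_py raw → Spec_is_semver_text_py raw (is_semver_text_py raw)

-- ===== LEMMAS AND PROOFS =====

-- reference structural recursion for splitting a char list on '.'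
-- (cur is the reversed current segment)
def pvSp : List Char → List Char → List (List Char)
  | [], cur => [cur.reverse]
  | c :: rest, cur => if c = '.' then cur.reverse :: pvSp rest [] else pvSp rest (c :: cur)

def pvGood (cs : List Char) : Bool := !cs.isEmpty && cs.all PySem.Chars.isdigit

lemma pvSp_ne_nil : ∀ (l cur : List Char), pvSp l cur ≠ [] := by
  intro l
  induction l with
  | nil => intro cur; simp [pvSp]
  | cons c rest ih =>
    intro cur
    simp only [pvSp]
    split
    · simp
    · exact ih (c :: cur)

lemma pvGo_eq : ∀ (fuel : Nat) (l cur : List Char) (acc : List (List Char)),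
    l.length < fuel →
    PySem.Chars.splitOn.go ['.'] fuel l cur acc = acc.reverse ++ pvSp l cur := by
  intro fuel
  induction fuel with
  | zero => intro l cur acc h; omega
  | succ fuel ih =>
    intro l cur acc h
    cases l with
    | nil => simp [PySem.Chars.splitOn.go, pvSp]
    | cons c rest =>
      by_cases hc : c = '.'
      · subst hc
        have hpre : List.isPrefixOf ['.'] ('.' :: rest) = true := by
          simp [List.isPrefixOf]
        simp only [PySem.Chars.splitOn.go, hpre, if_true, pvSp]
        have hdrop : List.drop (['.'] : List Char).length ('.' :: rest) = rest := by simp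
        rw [hdrop, ih rest [] (cur.reverse :: acc) (by simpa using Nat.lt_of_succ_lt_succ h)]
        simp
      · have hpre : List.isPrefixOf ['.'] (c :: rest) = false := by
          simp [List.isPrefixOf]
          exact fun h' => hc h'.symm
        simp only [PySem.Chars.splitOn.go, hpre, Bool.false_eq_true, if_false, pvSp, if_neg hc]
        exact ih rest (c :: cur) acc (by simpa using Nat.lt_of_succ_lt_succ h)

lemma pvSplitOn_eq (l : List Char) : PySem.Chars.splitOn l ['.'] = pvSp l [] := by
  unfold PySem.Chars.splitOn
  simpa using pvGo_eq (l.length + 1) l [] [] (by omega)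

lemma pvBadSeg : ∀ (l cur : List Char) (x : Char), x ∈ cur →
    PySem.Chars.isdigit x = false → (pvSp l cur).all pvGood = false := by
  intro l
  induction l with
  | nil =>
    intro cur x hx hxd
    have hbad : pvGood cur.reverse = false := by
      simp [pvGood, List.all_eq_false]
      exact fun _ => ⟨x, by simpa using hx, hxd⟩
    simp [pvSp, hbad]
  | cons c rest ih =>
    intro cur x hx hxd
    simp only [pvSp]
    split
    · have hbad : pvGood cur.reverse = false := by
        simp [pvGood, List.all_eq_false]
        exact fun _ => ⟨x, by simpa using hx, hxd⟩
      simp [hbad]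
    · exact ih (c :: cur) x (List.mem_cons_of_mem _ hx) hxd

lemma pvMain : ∀ (l cur : List Char) (dots : Nat),
    cur.all PySem.Chars.isdigit = true →
    pvAltLoop l dots cur.length =
      (decide (dots + (pvSp l cur).length = 3) && (pvSp l cur).all pvGood) := by
  intro l
  induction l with
  | nil =>
    intro cur dots hcur
    cases cur with
    | nil => simp [pvAltLoop, pvSp, pvGood]
    | cons a as =>
      have hcur' : PySem.Chars.isdigit a = true ∧ ∀ x ∈ as, PySem.Chars.isdigit x = true := by
        simpa using hcur
      by_cases hd : dots = 2
      · simp [pvAltLoop, pvSp, pvGood, hd, List.all_reverse, List.all_eq_true,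
          hcur'.1]
        exact hcur'.2
      · have h3 : ¬ (dots + 1 = 3) := by omega
        simp [pvAltLoop, pvSp, hd, h3]
  | cons c rest ih =>
    intro cur dots hcur
    by_cases hc : c = '.'
    · have hsp : pvSp (c :: rest) cur = cur.reverse :: pvSp rest [] := by
        simp [pvSp, hc]
      simp only [pvAltLoop, if_pos hc, hsp]
      by_cases hseg : cur.length = 0
      · have hnil : cur = [] := List.eq_nil_of_length_eq_zero hseg
        subst hnil
        rw [if_pos (show ([] : List Char).length = 0 ∨ dots = 2 from Or.inl rfl)]
        simp [pvGood]
      · by_cases hd : dots = 2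
        · rw [if_pos (Or.inr hd)]
          have hlen : (pvSp rest []).length ≠ 0 := by
            intro h0; exact pvSp_ne_nil rest [] (List.eq_nil_of_length_eq_zero h0)
          have h3 : ¬ (dots + ((pvSp rest []).length + 1) = 3) := by omega
          simp [h3]
        · have hcond : ¬ (cur.length = 0 ∨ dots = 2) := by tauto
          rw [if_neg hcond]
          have hih := ih [] (dots + 1) (by simp)
          simp only [List.length_nil] at hih
          rw [hih]
          have hgood : pvGood cur.reverse = true := by
            simp [pvGood, List.all_reverse, List.isEmpty_eq_false_iff]
            constructor
            · intro h0; exact hseg (by simp [h0])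
            · simpa using hcur
          simp only [List.all_cons, hgood, Bool.true_and, List.length_cons,
            show dots + ((pvSp rest []).length + 1) = dots + 1 + (pvSp rest []).length from by omega]
    · by_cases hdig : PySem.Chars.isdigit c = true
      · have hsp : pvSp (c :: rest) cur = pvSp rest (c :: cur) := by
          simp [pvSp, hc]
        simp only [pvAltLoop, if_neg hc, if_pos hdig, hsp]
        have hih := ih (c :: cur) dots (by simp [hdig, hcur])
        simpa using hih
      · have hsp : pvSp (c :: rest) cur = pvSp rest (c :: cur) := by
          simp [pvSp, hc]
        simp only [pvAltLoop, if_neg hc, if_neg hdig, hsp]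
        have hbad := pvBadSeg rest (c :: cur) c List.mem_cons_self
          (Bool.eq_false_iff.mpr hdig)
        simp [hbad]

lemma pvCheckParts_eq : ∀ (ps : List (List Char)),
    pvCheckParts (ps.map String.ofList) = ps.all pvGood := by
  intro ps
  induction ps with
  | nil => simp [pvCheckParts]
  | cons p rest ih =>
    simp only [List.map_cons, pvCheckParts, List.all_cons]
    by_cases hp : p = []
    · subst hp
      simp [pvGood]
    · have hne : ¬ (String.ofList p = "") := by
        intro h
        have := congrArg String.toList h
        simp at this
        exact hp this
      by_cases hd : PySem.Chars.strIsdigit p = true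
      · have hcond : ¬ (String.ofList p = "" ∨ ¬ PySem.Str.strIsdigit (String.ofList p)) := by
          simp [PySem.Str.strIsdigit, hd, hne]
        rw [if_neg hcond, ih]
        have hg : pvGood p = true := by
          simpa [PySem.Chars.strIsdigit, pvGood] using hd
        simp [hg]
      · have hcond : (String.ofList p = "" ∨ ¬ PySem.Str.strIsdigit (String.ofList p)) := by
          simp [PySem.Str.strIsdigit, hd]
        rw [if_pos hcond]
        have hg : pvGood p = false := by
          simpa [PySem.Chars.strIsdigit, pvGood] using Bool.eq_false_iff.mpr hd
        simp [hg]

-- ===== VERDICT (by name: the statement is the Claim_ definition above) =====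
theorem is_semver_text_py_spec : Claim_equal_is_semver_text_py := by
  intro raw _
  show is_semver_text_py raw = is_semver_text_py_alt raw
  unfold is_semver_text_py is_semver_text_py_alt
  have hsep : (".".toList) = ['.'] := by decide
  have hsplit : PySem.Str.split? raw "." =
      some ((pvSp raw.toList []).map String.ofList) := by
    simp [PySem.Str.split?, PySem.Chars.split?, hsep, pvSplitOn_eq]
  rw [hsplit]
  have hB := pvMain raw.toList [] 0 (by simp)
  simp only [List.length_nil] at hB
  rw [hB]
  simp only [List.length_map, pvCheckParts_eq]
  by_cases h3 : (pvSp raw.toList []).length = 3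
  · simp [h3]
  · simp [h3]
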